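-- pv_equiv track=rewrite | github.com/lazare-dev/av-catalog-converter | services/structure/header_detector.py | _find_duplicate_headers
-- ===== SOURCE A (Python) =====
-- from typing import Dict, Any, List, Set, Optional
--
-- def _find_duplicate_headers(headers: List) -> Dict[str, List[int]]:
--     """
--     Find duplicate header names
--
--     Args:
--         headers (List): Original headers
--
--     Returns:
--         Dict[str, List[int]]: Duplicate headers with their positions
--     """
--     duplicates = {}
--     seen = {}
--
--     for i, header in enumerate(headers):
--         header_str = str(header).strip()
--
--         if header_str in seen:
--             if header_str not in duplicates:
--                 duplicates[header_str] = [seen[header_str]]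
--             duplicates[header_str].append(i)
--         else:
--             seen[header_str] = i
--
--     return duplicates
-- ===== SOURCE B (Python) =====
-- from typing import List, Dict
--
-- def _find_duplicate_headers(headers: List) -> Dict[str, List[int]]:
--     # One pass builds the full position index; a second pass emits each
--     # duplicated key (with all its positions) at its second occurrence.
--     index = {}
--     for i, header in enumerate(headers):
--         index.setdefault(str(header).strip(), []).append(i)
--
--     result = {}
--     for i, header in enumerate(headers):
--         key = str(header).strip()
--         positions = index[key]
--         if len(positions) > 1 and positions[1] == i:
--             result[key] = positions
--     return result
-- ===== Notes on version B (the rewrite author's own statement) =====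
-- stated objective: alternative
-- what changed: Replaces A's dual-dict single pass (seen + duplicates with in-loop branching) by a build-complete-position-index pass followed by a filter pass that emits each duplicated key at its second occurrence.
import Mathlib
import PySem

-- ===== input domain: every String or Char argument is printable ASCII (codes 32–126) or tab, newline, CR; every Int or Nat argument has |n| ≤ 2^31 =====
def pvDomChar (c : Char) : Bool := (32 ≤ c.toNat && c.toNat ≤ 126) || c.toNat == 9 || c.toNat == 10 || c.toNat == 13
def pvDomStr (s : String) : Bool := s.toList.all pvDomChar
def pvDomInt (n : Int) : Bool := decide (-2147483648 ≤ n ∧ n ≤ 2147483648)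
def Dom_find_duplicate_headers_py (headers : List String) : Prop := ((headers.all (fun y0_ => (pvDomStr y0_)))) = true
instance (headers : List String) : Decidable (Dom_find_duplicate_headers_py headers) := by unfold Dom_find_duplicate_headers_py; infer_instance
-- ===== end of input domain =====

-- B replaces A's dual-dict single pass (seen + duplicates with in-loop branching) by a
-- build-complete-position-index pass followed by a filter pass emitting each duplicated
-- key at its second occurrence (objective: alternative decomposition, same cost).

-- ===== PORT A =====
-- loop body of A's single pass; state = (duplicates, seen)
def pvStepA (st : PySem.Dict String (List Int) × PySem.Dict String Int) (p : Int × String) :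
    PySem.Dict String (List Int) × PySem.Dict String Int :=
  let header_str := PySem.Str.strip p.2
  match st.2.get? header_str with
  | some v =>
      -- 'if header_str not in duplicates: duplicates[header_str] = [seen[header_str]]'
      let dups := if st.1.contains header_str then st.1 else st.1.insert header_str [v]
      -- 'duplicates[header_str].append(i)'
      (dups.modify header_str [] (fun l => l ++ [p.1]), st.2)
  | none => (st.1, st.2.insert header_str p.1)

def find_duplicate_headers_py (headers : List String) : List (String × List Int) :=
  ((PySem.List.enumerate headers).foldl pvStepA (PySem.Dict.empty, PySem.Dict.empty)).1.items

-- ===== PORT B =====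
-- pass 1: 'index.setdefault(str(header).strip(), []).append(i)'
def pvStepIndex (d : PySem.Dict String (List Int)) (p : Int × String) : PySem.Dict String (List Int) :=
  d.modify (PySem.Str.strip p.2) [] (fun l => l ++ [p.1])

-- pass 2 body: emit (key, positions) when this is the key's second occurrence
-- (index[key] cannot raise here, so the getD lookup is exact)
def pvStepEmit (index : PySem.Dict String (List Int)) (r : PySem.Dict String (List Int))
    (p : Int × String) : PySem.Dict String (List Int) :=
  let key := PySem.Str.strip p.2
  let ps := index.getD key []
  if 1 < ps.length ∧ PySem.List.pyGet? ps 1 = some p.1 then r.insert key ps else r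

def find_duplicate_headers_py_alt (headers : List String) : List (String × List Int) :=
  let es := PySem.List.enumerate headers
  let index := es.foldl pvStepIndex PySem.Dict.empty
  (es.foldl (pvStepEmit index) PySem.Dict.empty).items

-- ===== PRECONDITION & SPEC =====
def Spec_find_duplicate_headers_py (headers : List String) (out : List (String × List Int)) : Prop := out = find_duplicate_headers_py_alt headers
instance (headers : List String) (out : List (String × List Int)) : Decidable (Spec_find_duplicate_headers_py headers out) := by unfold Spec_find_duplicate_headers_py; infer_instance

-- ===== CLAIM (what is proved, stated in full; the proofs are below) =====
def Claim_equal_find_duplicate_headers_py : Prop := ∀ (headers : List String), Dom_find_duplicate_headers_py headers → Spec_find_duplicate_headers_py headers (find_duplicate_headers_py headers)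

-- ===== LEMMAS AND PROOFS =====

-- key of a header occurrence
def pvKey (p : Int × String) : String := PySem.Str.strip p.2

-- all positions carrying key k, in order
def pvOcc (es : List (Int × String)) (k : String) : List Int :=
  (es.filter (fun p => pvKey p == k)).map (fun p => p.1)

-- closed form both ports reach: each duplicated key, at its second occurrence,
-- paired with all of its positions
def pvF (es : List (Int × String)) : List (String × List Int) :=
  (es.filter (fun p => (pvOcc es (pvKey p))[1]? == some p.1)).map
    (fun p => (pvKey p, pvOcc es (pvKey p)))

theorem pvOcc_append (es : List (Int × String)) (e : Int × String) (k : String) :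
    pvOcc (es ++ [e]) k = pvOcc es k ++ (if pvKey e == k then [e.1] else []) := by
  simp only [pvOcc, List.filter_append, List.map_append]
  congr 1
  by_cases h : pvKey e == k <;> simp [h]

theorem pvMem_occ (es : List (Int × String)) (p : Int × String) (hp : p ∈ es) :
    p.1 ∈ pvOcc es (pvKey p) := by
  simp only [pvOcc, List.mem_map, List.mem_filter]
  exact ⟨p, ⟨hp, by simp⟩, rfl⟩

theorem pvOcc_lt (es : List (Int × String)) (k : String) (n : Int)
    (hpos : ∀ p ∈ es, p.1 < n) : ∀ x ∈ pvOcc es k, x < n := by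
  intro x hx
  simp only [pvOcc, List.mem_map, List.mem_filter] at hx
  obtain ⟨p, ⟨hp, -⟩, rfl⟩ := hx
  exact hpos p hp

theorem pvIndex_getD (es : List (Int × String)) (k : String) :
    (es.foldl pvStepIndex PySem.Dict.empty).getD k [] = pvOcc es k := by
  have h1 : es.foldl pvStepIndex PySem.Dict.empty
      = (es.map (fun p => (pvKey p, p.1))).foldl
          (fun d q => d.modify q.1 [] (fun l => l ++ [q.2])) PySem.Dict.empty := by
    rw [List.foldl_map]; rfl
  rw [h1, PySem.Dict.getD_foldl_modify_append, List.filter_map]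
  simp [pvOcc, Function.comp_def]

theorem pvEmit_eq (es : List (Int × String)) :
    pvStepEmit (es.foldl pvStepIndex PySem.Dict.empty) =
      fun r p => if ((pvOcc es (pvKey p))[1]? == some p.1) then
        r.insert (pvKey p) (pvOcc es (pvKey p)) else r := by
  funext r p
  have hget : ∀ l : List Int, PySem.List.pyGet? l 1 = l[1]? := by
    intro l
    simp only [PySem.List.pyGet?, PySem.List.pyIdx?]
    split <;> rename_i hc
    · simp at hc ⊢
      split <;> rename_i h1
      · rfl
      · simp [List.getElem?_eq_none (by omega : l.length ≤ 1)]
    · simp at hc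
  simp only [pvStepEmit, pvIndex_getD, pvKey, hget]
  by_cases h : (pvOcc es (PySem.Str.strip p.2))[1]? = some p.1
  · have hlen : 1 < (pvOcc es (PySem.Str.strip p.2)).length := by
      obtain ⟨h1, -⟩ := List.getElem?_eq_some_iff.mp h
      omega
    simp [hlen]
  · simp [h]

theorem pvNodup_keys (hs : List String) :
    (((PySem.List.enumerate hs).filter
        (fun p => (pvOcc (PySem.List.enumerate hs) (pvKey p))[1]? == some p.1)).map
      (fun p => pvKey p)).Nodup := by
  rw [List.Nodup, List.pairwise_map]
  have hpw := (List.Pairwise.sublist List.filter_sublist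
    (PySem.List.pairwise_lt_enumerate hs 0) :
    (List.filter (fun p => (pvOcc (PySem.List.enumerate hs) (pvKey p))[1]? == some p.1)
      (PySem.List.enumerate hs)).Pairwise (fun p q => p.1 < q.1))
  refine hpw.imp_of_mem ?_
  intro a b ha hb hlt hk
  obtain ⟨-, hca⟩ := List.mem_filter.mp ha
  obtain ⟨-, hcb⟩ := List.mem_filter.mp hb
  rw [hk] at hca
  rw [beq_iff_eq] at hca hcb
  rw [hca] at hcb
  simp at hcb
  omega

theorem pvB_eq_F (hs : List String) :
    find_duplicate_headers_py_alt hs = pvF (PySem.List.enumerate hs) := by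
  show ((PySem.List.enumerate hs).foldl
      (pvStepEmit ((PySem.List.enumerate hs).foldl pvStepIndex PySem.Dict.empty))
      PySem.Dict.empty).items = _
  rw [pvEmit_eq]
  rw [← List.foldl_filter]
  rw [PySem.Dict.items_foldl_insert_fresh _ (fun p => pvKey p)
        (fun p => pvOcc (PySem.List.enumerate hs) (pvKey p)) _
        (by intro a _; simp) (pvNodup_keys hs)]
  simp [pvF, PySem.Dict.empty]

theorem pvF_append (es : List (Int × String)) (e : Int × String)
    (hpos : ∀ p ∈ es, p.1 < e.1) :
    pvF (es ++ [e]) =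
      match pvOcc es (pvKey e) with
      | [] => pvF es
      | [j0] => pvF es ++ [(pvKey e, [j0, e.1])]
      | _ => (pvF es).map
          (fun q => if q.1 == pvKey e then (pvKey e, pvOcc es (pvKey e) ++ [e.1]) else q) := by
  have hocc' : ∀ p : Int × String, pvKey e ≠ pvKey p →
      pvOcc (es ++ [e]) (pvKey p) = pvOcc es (pvKey p) := by
    intro p h; rw [pvOcc_append]; simp [h]
  have he1 : pvOcc (es ++ [e]) (pvKey e) = pvOcc es (pvKey e) ++ [e.1] := by
    rw [pvOcc_append]; simp
  have hcond : ∀ p ∈ es, ((pvOcc (es ++ [e]) (pvKey p))[1]? == some p.1)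
      = ((pvOcc es (pvKey p))[1]? == some p.1) := by
    intro p hp
    by_cases h : pvKey e = pvKey p
    · rw [← h, he1]
      have hmem' : p.1 ∈ pvOcc es (pvKey e) := by rw [h]; exact pvMem_occ es p hp
      have hlt : p.1 < e.1 := hpos p hp
      rcases hl : pvOcc es (pvKey e) with - | ⟨j0, - | ⟨j1, t⟩⟩
      · rw [hl] at hmem'; simp at hmem'
      · rw [hl] at hmem'
        simp at hmem'
        subst hmem'
        simp
        omega
      · simp
    · rw [hocc' p h]
  unfold pvF
  rw [List.filter_append, List.map_append, List.filter_congr hcond]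
  rcases hl : pvOcc es (pvKey e) with - | ⟨j0, - | ⟨j1, t⟩⟩
  · -- no previous occurrence of this key
    have hce : ((pvOcc (es ++ [e]) (pvKey e))[1]? == some e.1) = false := by
      rw [he1, hl]; simp
    have hfe : List.filter (fun p => ((pvOcc (es ++ [e]) (pvKey p))[1]? == some p.1)) [e] = [] := by
      simp [hce]
    rw [hfe, List.map_nil, List.append_nil]
    apply List.map_congr_left
    intro p hp
    obtain ⟨hp, -⟩ := List.mem_filter.mp hp
    by_cases h : pvKey e = pvKey p
    · exfalso
      have := pvMem_occ es p hp
      rw [← h, hl] at this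
      simp at this
    · rw [hocc' p h]
  · -- exactly one previous occurrence: the new pair is appended
    have hce : ((pvOcc (es ++ [e]) (pvKey e))[1]? == some e.1) = true := by
      rw [he1, hl]; simp
    have hfe : List.filter (fun p => ((pvOcc (es ++ [e]) (pvKey p))[1]? == some p.1)) [e] = [e] := by
      simp [hce]
    rw [hfe, List.map_cons, List.map_nil, he1, hl]
    congr 1
    apply List.map_congr_left
    intro p hp
    obtain ⟨hp', hc⟩ := List.mem_filter.mp hp
    by_cases h : pvKey e = pvKey p
    · exfalso
      have := pvMem_occ es p hp'
      rw [← h, hl] at this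
      simp at this
      subst this
      rw [← h, hl] at hc
      simp at hc
    · rw [hocc' p h]
  · -- two or more previous occurrences: the stored list is extended in place
    have hj1 : j1 < e.1 := by
      refine pvOcc_lt es (pvKey e) e.1 hpos j1 ?_
      rw [hl]; simp
    have hce : ((pvOcc (es ++ [e]) (pvKey e))[1]? == some e.1) = false := by
      rw [he1, hl]
      rw [List.getElem?_append_left (by simp)]
      simp
      omega
    have hfe : List.filter (fun p => ((pvOcc (es ++ [e]) (pvKey p))[1]? == some p.1)) [e] = [] := by
      simp [hce]
    rw [hfe, List.map_nil, List.append_nil, List.map_map]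
    apply List.map_congr_left
    intro p hp
    obtain ⟨hp', -⟩ := List.mem_filter.mp hp
    by_cases h : pvKey e = pvKey p
    · simp only [Function.comp_apply, ← h, he1]
      rw [hl]
      simp
    · simp only [Function.comp_apply]
      rw [hocc' p h]
      rw [if_neg]
      simp [Ne.symm h]

theorem pvA_inv (hs : List String) :
    ((PySem.List.enumerate hs).foldl pvStepA (PySem.Dict.empty, PySem.Dict.empty)).1.items
        = pvF (PySem.List.enumerate hs) ∧
    (∀ k, ((PySem.List.enumerate hs).foldl pvStepA (PySem.Dict.empty, PySem.Dict.empty)).2.get? k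
        = (pvOcc (PySem.List.enumerate hs) k).head?) ∧
    (∀ k, ((PySem.List.enumerate hs).foldl pvStepA (PySem.Dict.empty, PySem.Dict.empty)).1.get? k
        = if 2 ≤ (pvOcc (PySem.List.enumerate hs) k).length
          then some (pvOcc (PySem.List.enumerate hs) k) else none) ∧
    ((PySem.List.enumerate hs).foldl pvStepA (PySem.Dict.empty, PySem.Dict.empty)).1.keys.Nodup := by
  induction hs using List.reverseRecOn with
  | nil =>
      refine ⟨?_, ?_, ?_, ?_⟩ <;>
        simp [PySem.List.enumerate, pvF, pvOcc, PySem.Dict.empty, PySem.Dict.get?,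
          PySem.Dict.keys]
  | append_singleton hs h IH =>
      obtain ⟨Hitems, Hseen, Hdup, Hnodup⟩ := IH
      have hes : PySem.List.enumerate (hs ++ [h]) =
          PySem.List.enumerate hs ++ [((hs.length : Int), h)] := by
        rw [PySem.List.enumerate_append]
        simp [PySem.List.enumerate_cons]
      rw [hes, List.foldl_append]
      have hpos : ∀ p ∈ PySem.List.enumerate hs, p.1 < ((hs.length : Int), h).1 := by
        intro p hp
        rw [PySem.List.mem_enumerate_iff] at hp
        obtain ⟨j, hj, rfl⟩ := hp
        simp
        omega
      have hFapp := pvF_append (PySem.List.enumerate hs) ((hs.length : Int), h) hpos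
      have hOapp := pvOcc_append (PySem.List.enumerate hs) ((hs.length : Int), h)
      simp only [List.foldl_cons, List.foldl_nil]
      simp only [pvKey] at hFapp hOapp
      rcases hl : pvOcc (PySem.List.enumerate hs) (PySem.Str.strip h) with - | ⟨j0, - | ⟨j1, t⟩⟩
      · -- first occurrence of this key
        rw [hl] at hFapp
        have h2 : (List.foldl pvStepA (PySem.Dict.empty, PySem.Dict.empty)
            (PySem.List.enumerate hs)).2.get? (PySem.Str.strip h) = none := by
          rw [Hseen, hl]; rfl
        have hstep : pvStepA (List.foldl pvStepA (PySem.Dict.empty, PySem.Dict.empty)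
              (PySem.List.enumerate hs)) ((hs.length : Int), h)
            = ((List.foldl pvStepA (PySem.Dict.empty, PySem.Dict.empty)
                (PySem.List.enumerate hs)).1,
               (List.foldl pvStepA (PySem.Dict.empty, PySem.Dict.empty)
                (PySem.List.enumerate hs)).2.insert (PySem.Str.strip h) (hs.length : Int)) := by
          simp only [pvStepA, h2]
        rw [hstep]
        refine ⟨by rw [hFapp]; exact Hitems, ?_, ?_, Hnodup⟩
        · intro k
          rw [hOapp k]
          by_cases hk : k = PySem.Str.strip h
          · subst hk
            simp [PySem.Dict.get?_insert_self, hl]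
          · rw [PySem.Dict.get?_insert_of_ne _ _ hk, Hseen k]
            simp [Ne.symm hk]
        · intro k
          rw [hOapp k]
          by_cases hk : k = PySem.Str.strip h
          · subst hk
            have := Hdup (PySem.Str.strip h)
            rw [hl] at this ⊢
            simpa using this
          · rw [Hdup k]
            simp [Ne.symm hk]
      · -- second occurrence: a fresh entry is appended to duplicates
        rw [hl] at hFapp
        have h2 : (List.foldl pvStepA (PySem.Dict.empty, PySem.Dict.empty)
            (PySem.List.enumerate hs)).2.get? (PySem.Str.strip h) = some j0 := by
          rw [Hseen, hl]; rfl
        have hget : (List.foldl pvStepA (PySem.Dict.empty, PySem.Dict.empty)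
            (PySem.List.enumerate hs)).1.get? (PySem.Str.strip h) = none := by
          rw [Hdup, hl]; rfl
        have hcont : (List.foldl pvStepA (PySem.Dict.empty, PySem.Dict.empty)
            (PySem.List.enumerate hs)).1.contains (PySem.Str.strip h) = false := by
          rw [PySem.Dict.contains_eq_isSome_get?, hget]; rfl
        have hstep : pvStepA (List.foldl pvStepA (PySem.Dict.empty, PySem.Dict.empty)
              (PySem.List.enumerate hs)) ((hs.length : Int), h)
            = ((List.foldl pvStepA (PySem.Dict.empty, PySem.Dict.empty)
                (PySem.List.enumerate hs)).1.insert (PySem.Str.strip h) [j0, (hs.length : Int)],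
               (List.foldl pvStepA (PySem.Dict.empty, PySem.Dict.empty)
                (PySem.List.enumerate hs)).2) := by
          simp only [pvStepA, h2, hcont]
          simp [PySem.Dict.modify, PySem.Dict.getD_insert_self, PySem.Dict.insert_insert_self]
        rw [hstep]
        refine ⟨?_, ?_, ?_, PySem.Dict.nodup_keys_insert _ _ _ Hnodup⟩
        · rw [PySem.Dict.items_insert_of_not_contains _ _ hcont, Hitems, hFapp]
        · intro k
          rw [hOapp k]
          by_cases hk : k = PySem.Str.strip h
          · subst hk
            rw [Hseen (PySem.Str.strip h), hl]
            simp
          · rw [Hseen k]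
            simp [Ne.symm hk]
        · intro k
          rw [hOapp k]
          by_cases hk : k = PySem.Str.strip h
          · subst hk
            rw [PySem.Dict.get?_insert_self, hl]
            simp
          · rw [PySem.Dict.get?_insert_of_ne _ _ hk, Hdup k]
            simp [Ne.symm hk]
      · -- third or later occurrence: the stored list is extended in place
        rw [hl] at hFapp
        have h2 : (List.foldl pvStepA (PySem.Dict.empty, PySem.Dict.empty)
            (PySem.List.enumerate hs)).2.get? (PySem.Str.strip h) = some j0 := by
          rw [Hseen, hl]; rfl
        have hget : (List.foldl pvStepA (PySem.Dict.empty, PySem.Dict.empty)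
            (PySem.List.enumerate hs)).1.get? (PySem.Str.strip h) = some (j0 :: j1 :: t) := by
          rw [Hdup, hl]
          simp
        have hcont : (List.foldl pvStepA (PySem.Dict.empty, PySem.Dict.empty)
            (PySem.List.enumerate hs)).1.contains (PySem.Str.strip h) = true := by
          rw [PySem.Dict.contains_eq_isSome_get?, hget]; rfl
        have hstep : pvStepA (List.foldl pvStepA (PySem.Dict.empty, PySem.Dict.empty)
              (PySem.List.enumerate hs)) ((hs.length : Int), h)
            = ((List.foldl pvStepA (PySem.Dict.empty, PySem.Dict.empty)
                (PySem.List.enumerate hs)).1.insert (PySem.Str.strip h)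
                  (j0 :: j1 :: t ++ [(hs.length : Int)]),
               (List.foldl pvStepA (PySem.Dict.empty, PySem.Dict.empty)
                (PySem.List.enumerate hs)).2) := by
          simp only [pvStepA, h2, hcont]
          simp [PySem.Dict.modify, PySem.Dict.getD_eq_get?_getD, hget]
        rw [hstep]
        refine ⟨?_, ?_, ?_, PySem.Dict.nodup_keys_insert _ _ _ Hnodup⟩
        · rw [PySem.Dict.items_insert_of_contains _ _ hcont, Hitems, hFapp]
        · intro k
          rw [hOapp k]
          by_cases hk : k = PySem.Str.strip h
          · subst hk
            rw [Hseen (PySem.Str.strip h), hl]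
            simp
          · rw [Hseen k]
            simp [Ne.symm hk]
        · intro k
          rw [hOapp k]
          by_cases hk : k = PySem.Str.strip h
          · subst hk
            rw [PySem.Dict.get?_insert_self, hl]
            simp
          · rw [PySem.Dict.get?_insert_of_ne _ _ hk, Hdup k]
            simp [Ne.symm hk]

-- ===== VERDICT (by name: the statement is the Claim_ definition above) =====
theorem find_duplicate_headers_py_spec : Claim_equal_find_duplicate_headers_py := by
  intro headers _
  unfold Spec_find_duplicate_headers_py
  rw [pvB_eq_F]
  exact (pvA_inv headers).1
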